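-- pv_equiv track=rewrite | github.com/HamzaElhim/QCM-PYTHON | Final_project/Classes/Levels/ThirdLevel.py | manipulateData
-- ===== SOURCE A (Python) =====
-- def manipulateData(file_data):
--         """
--     PARAMETERS :
--         => file_data : represent a list of  the retreived data(quistion and answer) from the file
--     ROLE :
--         => create a new list has each qestion in one postion in the array
--             and each answer in one positoin in the array
--         exmp : ['q1...?','ans1...end answ1','answer2..']= ['q1...','...?','ans1..','...','..end answ1','answer2..']
--
--     RETURN :
--         list of qustions and answers
--     """
--         NewList = []
--         j = 0
--         for i in range(len(file_data)):
--             if file_data[i].endswith('?'):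
--                 NewList.append(" ".join(file_data[ j : i + 1 ]))
--                 j = i + 1
--             elif file_data[i].endswith('.') or file_data[i].endswith('*'):
--                 NewList.append(" ".join(file_data[ j : i + 1 ]))
--                 j = i + 1
--
--         return NewList
-- ===== SOURCE B (Python) =====
-- def manipulateData(file_data):
--     result = []
--     current = []
--     for tok in file_data:
--         current.append(tok)
--         if tok.endswith('?') or tok.endswith('.') or tok.endswith('*'):
--             result.append(" ".join(current))
--             current = []
--     return result
-- ===== Notes on version B (the rewrite author's own statement) =====
-- stated objective: simpler
-- what changed: Replaces the index/slice bookkeeping (range over indices, last-boundary index j, re-slicing file_data[j:i+1] at each flush) with a single accumulator-flush pass that buffers tokens and joins the buffer when a token ends with '?', '.' or '*'; leftover tokens are dropped as in A.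
import Mathlib
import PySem

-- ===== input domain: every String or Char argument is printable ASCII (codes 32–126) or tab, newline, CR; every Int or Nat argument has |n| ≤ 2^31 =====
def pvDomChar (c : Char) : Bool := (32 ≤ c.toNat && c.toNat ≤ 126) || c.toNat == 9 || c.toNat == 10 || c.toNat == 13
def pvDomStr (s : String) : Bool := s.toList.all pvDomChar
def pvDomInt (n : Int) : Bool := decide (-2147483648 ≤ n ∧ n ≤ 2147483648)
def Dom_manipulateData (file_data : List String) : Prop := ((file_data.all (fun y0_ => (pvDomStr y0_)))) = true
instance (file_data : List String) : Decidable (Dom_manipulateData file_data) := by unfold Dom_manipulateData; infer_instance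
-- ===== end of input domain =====

-- B replaces A's index/slice bookkeeping with a single accumulator-flush pass (simpler decomposition, same cost).

-- ===== PORT A =====
-- A's loop body: index i, state (NewList, j); flush joins the slice file_data[j:i+1].
def pvStepA (file_data : List String) (st : List String × Int) (i : Int) : List String × Int :=
  let s := PySem.List.pyGetD file_data i ""
  if PySem.Str.endswith s "?" then
    (st.1 ++ [PySem.Str.join " " (PySem.List.slice file_data (some st.2) (some (i + 1)))], i + 1)
  else if PySem.Str.endswith s "." || PySem.Str.endswith s "*" then
    (st.1 ++ [PySem.Str.join " " (PySem.List.slice file_data (some st.2) (some (i + 1)))], i + 1)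
  else st

def manipulateData (file_data : List String) : List String :=
  ((PySem.List.pyRange 0 (PySem.List.len file_data) 1).foldl (pvStepA file_data) ([], 0)).1

-- ===== PORT B =====
-- B's loop body: state (result, current buffer); append token, flush the buffer on a terminal token.
def pvStepB (st : List String × List String) (tok : String) : List String × List String :=
  let cur := st.2 ++ [tok]
  if PySem.Str.endswith tok "?" || PySem.Str.endswith tok "." || PySem.Str.endswith tok "*" then
    (st.1 ++ [PySem.Str.join " " cur], [])
  else
    (st.1, cur)

def manipulateData_alt (file_data : List String) : List String :=
  (file_data.foldl pvStepB ([], [])).1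

-- ===== PRECONDITION & SPEC =====
def Spec_manipulateData (file_data : List String) (out : List String) : Prop := out = manipulateData_alt file_data
instance (file_data : List String) (out : List String) : Decidable (Spec_manipulateData file_data out) := by unfold Spec_manipulateData; infer_instance

-- ===== CLAIM (what is proved, stated in full; the proofs are below) =====
def Claim_equal_manipulateData : Prop := ∀ (file_data : List String), Dom_manipulateData file_data → Spec_manipulateData file_data (manipulateData file_data)

-- ===== LEMMAS AND PROOFS =====

-- buffer growth: appending fd[i] to the buffer fd[j:i] gives fd[j:i+1]
lemma pvBuf_snoc (fd : List String) (j i : Nat) (hj : j ≤ i) (hi : i < fd.length) :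
    (fd.drop j).take (i - j) ++ [fd[i]] = (fd.drop j).take (i + 1 - j) := by
  have hlen : i - j < (fd.drop j).length := by simp [List.length_drop]; omega
  have hget : (fd.drop j)[i - j] = fd[i] := by
    rw [List.getElem_drop]; congr 1; omega
  have : i + 1 - j = (i - j) + 1 := by omega
  rw [this, List.take_add_one, List.getElem?_eq_getElem hlen, hget]
  simp

-- main loop invariant: A's fold from index i with boundary j equals B's fold over the
-- remaining tokens with buffer fd[j:i]
lemma pvLoop_eq (fd : List String) : ∀ (n i j : Nat) (res : List String),
    i + n = fd.length → j ≤ i →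
    ((PySem.List.pyRange (i : Int) (fd.length : Int) 1).foldl (pvStepA fd) (res, (j : Int))).1
      = ((fd.drop i).foldl pvStepB (res, (fd.drop j).take (i - j))).1 := by
  intro n
  induction n with
  | zero =>
    intro i j res hn hj
    have hi : i = fd.length := by omega
    rw [PySem.List.pyRange_one_eq_nil (by omega : (fd.length : Int) ≤ (i : Int))]
    simp [hi]
  | succ n ih =>
    intro i j res hn hj
    have hi : i < fd.length := by omega
    rw [PySem.List.pyRange_one_cons (by exact_mod_cast hi)]
    rw [List.drop_eq_getElem_cons hi]
    simp only [List.foldl_cons]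
    have hget : PySem.List.pyGetD fd (i : Int) "" = fd[i] := by
      rw [PySem.List.pyGetD_of_nonneg]
      · simp [List.getD_eq_getElem?_getD, List.getElem?_eq_getElem hi]
      · omega
    have hslice : PySem.List.slice fd (some (j : Int)) (some ((i : Int) + 1))
        = (fd.drop j).take (i + 1 - j) := by
      have h : ((i : Int) + 1) = ((i + 1 : Nat) : Int) := by push_cast; ring
      rw [h, PySem.List.slice_natCast]
    have hcast : ((i : Int) + 1) = ((i + 1 : Nat) : Int) := by push_cast; ring
    have hbuf := pvBuf_snoc fd j i hj hi
    by_cases c1 : PySem.Chars.endswith fd[i].toList ['?'] = true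
    · have hA : pvStepA fd (res, (j : Int)) (i : Int)
          = (res ++ [PySem.Str.join " " ((fd.drop j).take (i + 1 - j))], (i : Int) + 1) := by
        simp [pvStepA, hget, hslice, c1]
      have hB : pvStepB (res, (fd.drop j).take (i - j)) fd[i]
          = (res ++ [PySem.Str.join " " ((fd.drop j).take (i + 1 - j))], []) := by
        simp [pvStepB, c1, hbuf]
      rw [hA, hB, hcast, ih (i + 1) (i + 1) _ (by omega) (by omega)]
      simp
    · by_cases c2 : PySem.Chars.endswith fd[i].toList ['.'] = true
      · have hA : pvStepA fd (res, (j : Int)) (i : Int)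
            = (res ++ [PySem.Str.join " " ((fd.drop j).take (i + 1 - j))], (i : Int) + 1) := by
          simp [pvStepA, hget, hslice, c1, c2]
        have hB : pvStepB (res, (fd.drop j).take (i - j)) fd[i]
            = (res ++ [PySem.Str.join " " ((fd.drop j).take (i + 1 - j))], []) := by
          simp [pvStepB, c2, hbuf]
        rw [hA, hB, hcast, ih (i + 1) (i + 1) _ (by omega) (by omega)]
        simp
      · by_cases c3 : PySem.Chars.endswith fd[i].toList ['*'] = true
        · have hA : pvStepA fd (res, (j : Int)) (i : Int)
              = (res ++ [PySem.Str.join " " ((fd.drop j).take (i + 1 - j))], (i : Int) + 1) := by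
            simp [pvStepA, hget, hslice, c1, c2, c3]
          have hB : pvStepB (res, (fd.drop j).take (i - j)) fd[i]
              = (res ++ [PySem.Str.join " " ((fd.drop j).take (i + 1 - j))], []) := by
            simp [pvStepB, c3, hbuf]
          rw [hA, hB, hcast, ih (i + 1) (i + 1) _ (by omega) (by omega)]
          simp
        · have hA : pvStepA fd (res, (j : Int)) (i : Int) = (res, (j : Int)) := by
            simp [pvStepA, hget, c1, c2, c3]
          have hB : pvStepB (res, (fd.drop j).take (i - j)) fd[i]
              = (res, (fd.drop j).take (i + 1 - j)) := by
            simp [pvStepB, c1, c2, c3, hbuf]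
          rw [hA, hB]
          exact ih (i + 1) j res (by omega) (by omega)

-- ===== VERDICT (by name: the statement is the Claim_ definition above) =====
theorem manipulateData_spec : Claim_equal_manipulateData := by
  intro fd _
  unfold Spec_manipulateData manipulateData manipulateData_alt
  have h := pvLoop_eq fd fd.length 0 0 [] (by omega) (by omega)
  simpa using h
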